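-- pv_equiv track=rewrite | github.com/MaurizioMartin/codewars | Katas/19-pattern.py | patternNacho
-- ===== SOURCE A (Python) =====
-- def patternNacho(rows, columns, s):
--     d = rows*columns
--     s += " "*(d-len(s))
--     res = "+---"*columns+"+\n"
--     for i in range(len(s)):
--       if i%columns==(columns-1) and i!=len(s)-1:
--         res += "| "+s[i]+" |\n"+"+---"*columns+"+\n"
--       elif i%columns==(columns-1) and i==len(s)-1:
--         res += "| "+s[i]+" |\n"+"+---"*columns+"+"
--       else:
--         res += "| "+s[i]+" "
--
--     return res
-- ===== SOURCE B (Python) =====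
-- def patternNacho(rows, columns, s):
--     s = s + " " * (rows * columns - len(s))
--     border = "+---" * columns + "+"
--     full, rem = divmod(len(s), columns)
--     parts = ["\n| " + " | ".join(s[k * columns:(k + 1) * columns]) + " |\n" + border
--              for k in range(full)]
--     if rem:
--         parts.append("\n" + "".join("| " + c + " " for c in s[full * columns:]))
--     body = "".join(parts)
--     return border + (body if body else "\n")
-- ===== Notes on version B (the rewrite author's own statement) =====
-- stated objective: alternative
-- what changed: B replaces A's per-index loop (testing i%columns and i==len-1 at every character while growing one string by +=) by chunking the padded string into column-sized rows via divmod — each full chunk becomes a '| a | b |' row via ' | '.join, a trailing partial chunk becomes open cells — collected in a list and assembled with a single join, so the quirky last-border/trailing-newline cases fall out of the chunk structure.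
-- outside the precondition, e.g. on patternNacho(1, 0, ''): A returns '+\n', B raises ZeroDivisionError; on patternNacho(1, -2, 'ab'): A returns '+\n| a | b ', B returns '+\n'
import Mathlib
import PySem

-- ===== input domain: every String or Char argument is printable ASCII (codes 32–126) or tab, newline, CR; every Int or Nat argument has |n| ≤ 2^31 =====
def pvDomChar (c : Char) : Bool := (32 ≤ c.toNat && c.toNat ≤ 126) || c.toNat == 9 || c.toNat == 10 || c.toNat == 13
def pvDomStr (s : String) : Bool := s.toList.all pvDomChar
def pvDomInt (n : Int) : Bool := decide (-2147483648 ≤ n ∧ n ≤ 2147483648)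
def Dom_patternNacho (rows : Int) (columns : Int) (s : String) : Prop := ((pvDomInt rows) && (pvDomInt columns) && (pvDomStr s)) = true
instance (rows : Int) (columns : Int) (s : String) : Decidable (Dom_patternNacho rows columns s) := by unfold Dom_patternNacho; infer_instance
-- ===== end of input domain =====

-- B builds the grid by chunking the padded string into column-sized rows (divmod + one join)
-- instead of A's per-index modulus tests growing one string; equivalence is proved for
-- positive column counts (the natural domain; A raises ZeroDivisionError at columns = 0
-- on non-empty input, and so does B).

-- ===== PORT A =====
def patternNacho (rows : Int) (columns : Int) (s : String) : String :=
  let cs := s.toList ++ PySem.List.pyRepeat [' '] (rows * columns - (s.toList.length : Int))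
  let n : Int := (cs.length : Int)
  let out := (PySem.List.pyRange 0 n).foldl (fun res i =>
    res ++
      (if PySem.Int.mod i columns = columns - 1 ∧ i ≠ n - 1 then
        "| ".toList ++ [PySem.List.pyGetD cs i ' '] ++ " |\n".toList ++
          PySem.List.pyRepeat "+---".toList columns ++ "+\n".toList
      else if PySem.Int.mod i columns = columns - 1 ∧ i = n - 1 then
        "| ".toList ++ [PySem.List.pyGetD cs i ' '] ++ " |\n".toList ++
          PySem.List.pyRepeat "+---".toList columns ++ "+".toList
      else
        "| ".toList ++ [PySem.List.pyGetD cs i ' '] ++ " ".toList))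
    (PySem.List.pyRepeat "+---".toList columns ++ "+\n".toList)
  String.ofList out

-- ===== PORT B =====
-- '"| " + c + " "' (one open cell)
def pvCell (c : Char) : List Char := "| ".toList ++ [c] ++ " ".toList

-- '"".join("| " + c + " " for c in s)'
def pvCells (cs : List Char) : List Char := cs.flatMap pvCell

def patternNacho_alt (rows : Int) (columns : Int) (s : String) : String :=
  let cs := s.toList ++ PySem.List.pyRepeat [' '] (rows * columns - (s.toList.length : Int))
  let border := PySem.List.pyRepeat "+---".toList columns ++ "+".toList
  -- 'full, rem = divmod(len(s), columns)': floordiv/mod are exact for columns ≠ 0;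
  -- at columns = 0 Python raises ZeroDivisionError (outside Pre_patternNacho)
  let full := PySem.Int.floordiv (cs.length : Int) columns
  let rem := PySem.Int.mod (cs.length : Int) columns
  let parts := (List.range full.toNat).map (fun (k : Nat) =>
    "\n| ".toList ++ PySem.Chars.join " | ".toList
        ((PySem.List.slice cs (some ((k : Int) * columns)) (some (((k : Int) + 1) * columns))).map (fun c => [c])) ++
      " |\n".toList ++ border)
  let parts := if rem ≠ 0 then
      parts ++ ["\n".toList ++ pvCells (PySem.List.slice cs (some (full * columns)) none)]
    else parts
  let body := parts.flatten
  String.ofList (border ++ (if body ≠ [] then body else "\n".toList))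

-- ===== PRECONDITION & SPEC =====
-- Pre_ restricts to positive column counts, the natural domain of a grid: at columns = 0 both
-- programs raise ZeroDivisionError on non-empty input (A returns '+\n' only for the empty string,
-- where B still raises), and a negative column count is outside the task's natural domain
-- (A's open-cell output there is an artefact of its modulus test never firing).
def Pre_patternNacho (rows : Int) (columns : Int) (s : String) : Prop := 1 ≤ columns
instance (rows : Int) (columns : Int) (s : String) : Decidable (Pre_patternNacho rows columns s) := by unfold Pre_patternNacho; infer_instance

def pvWitness_patternNacho : Int × Int × String := (2, 3, "hello")

def Spec_patternNacho (rows : Int) (columns : Int) (s : String) (out : String) : Prop := out = patternNacho_alt rows columns s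
instance (rows : Int) (columns : Int) (s : String) (out : String) : Decidable (Spec_patternNacho rows columns s out) := by unfold Spec_patternNacho; infer_instance

-- ===== CLAIM (what is proved, stated in full; the proofs are below) =====
def Claim_equal_patternNacho : Prop := ∀ (rows : Int) (columns : Int) (s : String), Dom_patternNacho rows columns s → Pre_patternNacho rows columns s → Spec_patternNacho rows columns s (patternNacho rows columns s)

-- ===== LEMMAS AND PROOFS =====

-- the border line "+---"*columns+"+"
def pvBorder (columns : Int) : List Char := PySem.List.pyRepeat "+---".toList columns ++ "+".toList

-- proof-side view of B's row list: consume the remaining characters chunk by chunk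
def pvRowLoopD (cols : Nat) (border : List Char) (cs : List Char) : List Char × List Char :=
  if h : 0 < cols ∧ cols ≤ cs.length then
    let pr := pvRowLoopD cols border (cs.drop cols)
    ("\n| ".toList ++ PySem.Chars.join " | ".toList ((cs.take cols).map (fun c => [c])) ++
       " |\n".toList ++ border ++ pr.1, pr.2)
  else ([], cs)
termination_by cs.length
decreasing_by simp only [List.length_drop]; omega

-- Nat-level view of one of B's comprehension rows, anchored at character offset m
def pvRowN (cols : Nat) (border : List Char) (cs : List Char) (m : Nat) : List Char :=
  "\n| ".toList ++ PySem.Chars.join " | ".toList (((cs.drop m).take cols).map (fun c => [c])) ++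
    " |\n".toList ++ border

-- B's range(full) comprehension computes the chunk recursion
lemma pvChunksBridge (c : Nat) (border : List Char) (hc : 0 < c) : ∀ (fuel : Nat) (cs : List Char),
    cs.length ≤ fuel →
    ((List.range (cs.length / c)).map (fun k => pvRowN c border cs (k * c))).flatten
        = (pvRowLoopD c border cs).1 ∧
    cs.drop ((cs.length / c) * c) = (pvRowLoopD c border cs).2 := by
  intro fuel
  induction fuel with
  | zero =>
    intro cs hf
    have h0 : cs.length = 0 := by omega
    rw [pvRowLoopD, dif_neg (by omega), h0]
    simp
  | succ f ih =>
    intro cs hf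
    by_cases h : c ≤ cs.length
    · rw [pvRowLoopD, dif_pos ⟨hc, h⟩]
      have hq : cs.length / c = (cs.drop c).length / c + 1 := by
        obtain ⟨m, hm⟩ := Nat.exists_eq_add_of_le h
        rw [List.length_drop, hm, Nat.add_sub_cancel_left, Nat.add_comm c m, Nat.add_div_right m hc]
      obtain ⟨h1, h2⟩ := ih (cs.drop c) (by simp; omega)
      have hrow : ∀ k : Nat, pvRowN c border cs ((k + 1) * c) = pvRowN c border (cs.drop c) (k * c) := by
        intro k
        unfold pvRowN
        rw [List.drop_drop, show c + k * c = (k + 1) * c by ring]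
      constructor
      · rw [hq, List.range_succ_eq_map, List.map_cons, List.map_map, List.flatten_cons]
        rw [List.map_congr_left (g := fun k => pvRowN c border (cs.drop c) (k * c))
          (fun k _ => by simpa [Function.comp, Nat.succ_eq_add_one] using hrow k)]
        rw [h1]
        simp [pvRowN, List.append_assoc]
      · rw [hq, show ((cs.drop c).length / c + 1) * c = c + (cs.drop c).length / c * c by ring,
          ← List.drop_drop, h2]
    · rw [pvRowLoopD, dif_neg (by omega), Nat.div_eq_of_lt (by omega)]
      simp

-- what A's loop appends at index i
def pvEmit (cols n : Int) (cs : List Char) (i : Int) : List Char :=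
  if PySem.Int.mod i cols = cols - 1 ∧ i ≠ n - 1 then
    "| ".toList ++ [PySem.List.pyGetD cs i ' '] ++ " |\n".toList ++
      PySem.List.pyRepeat "+---".toList cols ++ "+\n".toList
  else if PySem.Int.mod i cols = cols - 1 ∧ i = n - 1 then
    "| ".toList ++ [PySem.List.pyGetD cs i ' '] ++ " |\n".toList ++
      PySem.List.pyRepeat "+---".toList cols ++ "+".toList
  else
    pvCell (PySem.List.pyGetD cs i ' ')

lemma pvFlatMap_congr {α β : Type} {l : List α} {f g : α → List β} (h : ∀ x ∈ l, f x = g x) :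
    l.flatMap f = l.flatMap g := by
  induction l with
  | nil => rfl
  | cons a t ih =>
    simp only [List.flatMap_cons, h a (List.mem_cons_self), ih (fun x hx => h x (List.mem_cons_of_mem a hx))]

lemma pvModSmall {i cols : Int} (hc : 0 < cols) (h0 : 0 ≤ i) (h1 : i < cols) :
    PySem.Int.mod i cols = i := by
  rw [PySem.Int.mod_eq_emod_of_pos hc]; exact Int.emod_eq_of_lt h0 h1

lemma pvModShift (cols j : Int) (hc : 0 < cols) :
    PySem.Int.mod (cols + j) cols = PySem.Int.mod j cols := by
  rw [PySem.Int.mod_eq_emod_of_pos hc, PySem.Int.mod_eq_emod_of_pos hc,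
    show cols + j = j + cols * 1 by ring, Int.add_mul_emod_self_left]

lemma pvA_eq (rows columns : Int) (s : String) :
    patternNacho rows columns s =
      String.ofList (pvBorder columns ++ '\n' ::
        (PySem.List.pyRange 0 ((s.toList ++ PySem.List.pyRepeat [' '] (rows * columns - (s.toList.length : Int))).length : Int)).flatMap
          (pvEmit columns ((s.toList ++ PySem.List.pyRepeat [' '] (rows * columns - (s.toList.length : Int))).length : Int)
            (s.toList ++ PySem.List.pyRepeat [' '] (rows * columns - (s.toList.length : Int))))) := by
  simp only [patternNacho]
  rw [PySem.List.foldl_append_eq_flatMap]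
  unfold pvEmit pvBorder pvCell
  simp [List.append_assoc]

lemma pvCellsPrefix (cs : List Char) : ∀ (m : Nat), m ≤ cs.length →
    (PySem.List.pyRange 0 (m : Int)).flatMap (fun i => pvCell (PySem.List.pyGetD cs i ' ')) =
      pvCells (cs.take m) := by
  intro m
  induction m with
  | zero => intro _; simp [PySem.List.pyRange_one_eq_nil, pvCells]
  | succ k ih =>
    intro hm
    have : ((k + 1 : Nat) : Int) = (k : Int) + 1 := by push_cast; ring
    rw [this, PySem.List.pyRange_one_succ_right (by positivity)]
    rw [List.flatMap_append, ih (by omega)]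
    have hget : PySem.List.pyGetD cs (k : Int) ' ' = cs[k]'(by omega) := by
      rw [PySem.List.pyGetD_eq_getElem cs ' ' (by positivity) (by exact_mod_cast (by omega : k < cs.length))]
      simp
    have htake : cs.take (k+1) = cs.take k ++ [cs[k]'(by omega)] := by
      rw [List.take_add_one, List.getElem?_eq_getElem (by omega : k < cs.length)]
      rfl
    simp only [pvCells] at *
    rw [htake, List.flatMap_append]
    simp [hget]

lemma pvJoinRow (c : Char) : ∀ (cs : List Char),
    pvCells cs ++ "| ".toList ++ [c] ++ " |".toList =
      "| ".toList ++ PySem.Chars.join " | ".toList ((cs ++ [c]).map (fun x => [x])) ++ " |".toList := by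
  intro cs
  induction cs with
  | nil => simp [pvCells, PySem.Chars.join_singleton]
  | cons a t ih =>
    have hne : (t ++ [c]).map (fun x => [x]) ≠ [] := by simp
    obtain ⟨q, rest, hq⟩ : ∃ q rest, (t ++ [c]).map (fun x => [x]) = q :: rest := by
      cases h : (t ++ [c]).map (fun x => [x]) with
      | nil => exact absurd h hne
      | cons q rest => exact ⟨q, rest, rfl⟩
    have key : pvCells (a :: t) ++ "| ".toList ++ [c] ++ " |".toList
        = pvCell a ++ (pvCells t ++ "| ".toList ++ [c] ++ " |".toList) := by
      simp [pvCells, List.append_assoc]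
    rw [key, ih]
    rw [show ((a :: t) ++ [c]).map (fun x => [x]) = [a] :: (t ++ [c]).map (fun x => [x]) from by simp]
    rw [hq, PySem.Chars.join_cons_cons, ← hq]
    have h1 : "| ".toList = ['|',' '] := rfl
    have h3 : " | ".toList = [' ','|',' '] := rfl
    have h4 : " |".toList = [' ','|'] := rfl
    have h2 : (" ".toList : List Char) = [' '] := rfl
    simp only [pvCell, h1, h2, h3, h4, List.cons_append, List.append_assoc, List.nil_append]

lemma pvMain (cols : Int) (hc : 0 < cols) : ∀ (N : Nat), ∀ (cs : List Char), cs.length ≤ N → cs ≠ [] →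
    '\n' :: (PySem.List.pyRange 0 (cs.length : Int)).flatMap (pvEmit cols (cs.length : Int) cs) =
      (if (pvRowLoopD cols.toNat (pvBorder cols) cs).2 ≠ [] then
        (pvRowLoopD cols.toNat (pvBorder cols) cs).1 ++ '\n' :: pvCells (pvRowLoopD cols.toNat (pvBorder cols) cs).2
      else (pvRowLoopD cols.toNat (pvBorder cols) cs).1) := by
  intro N
  induction N with
  | zero =>
    intro cs h hne
    exact absurd (List.eq_nil_of_length_eq_zero (by omega)) hne
  | succ N ih =>
    intro cs hlen hne
    have hlpos : 0 < cs.length := List.length_pos_of_ne_nil hne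
    by_cases hsmall : cs.length < cols.toNat
    · -- fewer characters than one row: only open cells
      rw [pvRowLoopD, dif_neg (by omega)]
      simp only [ne_eq, hne, not_false_eq_true, if_pos, List.nil_append]
      have hcongr : ∀ i ∈ PySem.List.pyRange 0 (cs.length : Int),
          pvEmit cols (cs.length : Int) cs i = pvCell (PySem.List.pyGetD cs i ' ') := by
        intro i hi
        rw [PySem.List.mem_pyRange_one] at hi
        have hmod : PySem.Int.mod i cols = i := pvModSmall hc hi.1 (by omega)
        unfold pvEmit
        rw [if_neg (by omega), if_neg (by omega)]
      rw [pvFlatMap_congr hcongr, pvCellsPrefix cs cs.length (le_refl _), List.take_length]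
    · -- at least one full row
      have hm : ((cols.toNat : Int)) = cols := Int.toNat_of_nonneg hc.le
      have hm1 : 1 ≤ cols.toNat := by omega
      have hmlen : cols.toNat ≤ cs.length := by omega
      obtain ⟨m', hm'⟩ : ∃ m', cols.toNat = m' + 1 := ⟨cols.toNat - 1, by omega⟩
      have hm'len : m' < cs.length := by omega
      have hloop : pvRowLoopD cols.toNat (pvBorder cols) cs =
          ("\n| ".toList ++ PySem.Chars.join " | ".toList ((cs.take cols.toNat).map (fun c => [c])) ++
            " |\n".toList ++ pvBorder cols ++ (pvRowLoopD cols.toNat (pvBorder cols) (cs.drop cols.toNat)).1,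
           (pvRowLoopD cols.toNat (pvBorder cols) (cs.drop cols.toNat)).2) := by
        rw [pvRowLoopD, dif_pos ⟨hm1, hmlen⟩]
      have htake : cs.take cols.toNat = cs.take m' ++ [cs[m']'hm'len] := by
        rw [hm', List.take_add_one, List.getElem?_eq_getElem hm'len]
        rfl
      have hrow : "| ".toList ++ PySem.Chars.join " | ".toList ((cs.take cols.toNat).map (fun x => [x])) ++ " |".toList
          = pvCells (cs.take m') ++ "| ".toList ++ [cs[m']'hm'len] ++ " |".toList := by
        rw [htake]
        exact (pvJoinRow _ _).symm
      have hrowT : ∀ T : List Char,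
          "| ".toList ++ (PySem.Chars.join " | ".toList ((cs.take cols.toNat).map (fun c => [c])) ++ (" |".toList ++ T))
          = pvCells (cs.take m') ++ ("| ".toList ++ (cs[m']'hm'len :: (" |".toList ++ T))) := by
        intro T
        have h2 := congrArg (· ++ T) hrow
        simpa [List.append_assoc] using h2
      -- split A's index range: the first row, its closing index, the rest
      rw [PySem.List.pyRange_one_append 0 cols (cs.length : Int) hc.le (by omega), List.flatMap_append]
      rw [show PySem.List.pyRange 0 cols = PySem.List.pyRange 0 (cols - 1) ++ [cols - 1] by
        rw [← PySem.List.pyRange_one_singleton (cols - 1),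
          ← PySem.List.pyRange_one_append 0 (cols - 1) ((cols - 1) + 1) (by omega) (by omega)]
        norm_num, List.flatMap_append]
      have hfront : (PySem.List.pyRange 0 (cols - 1)).flatMap (pvEmit cols (cs.length : Int) cs)
          = pvCells (cs.take m') := by
        have hcast : ((m' : Nat) : Int) = cols - 1 := by omega
        rw [pvFlatMap_congr (g := fun i => pvCell (PySem.List.pyGetD cs i ' ')) ?_, ← hcast,
          pvCellsPrefix cs m' (by omega)]
        intro i hi
        rw [PySem.List.mem_pyRange_one] at hi
        have hmod : PySem.Int.mod i cols = i := pvModSmall hc hi.1 (by omega)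
        unfold pvEmit
        rw [if_neg (by omega), if_neg (by omega)]
      rw [hfront]
      have hget : PySem.List.pyGetD cs (cols - 1) ' ' = cs[m']'hm'len := by
        rw [PySem.List.pyGetD_eq_getElem cs ' ' (by omega) (by omega)]
        congr 1
        omega
      have hmodlast : PySem.Int.mod (cols - 1) cols = cols - 1 := pvModSmall hc (by omega) (by omega)
      by_cases hend : cs.length = cols.toNat
      · -- the string is exactly one row: closing border, no trailing newline
        have hdrop : cs.drop cols.toNat = [] := by
          rw [List.drop_eq_nil_iff]
          omega
        have hloop2 : pvRowLoopD cols.toNat (pvBorder cols) (cs.drop cols.toNat) = ([], []) := by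
          rw [hdrop, pvRowLoopD, dif_neg (by simp)]
        rw [hloop, hloop2]
        rw [if_neg (by simp)]
        have hmid : (PySem.List.pyRange cols (cs.length : Int)).flatMap (pvEmit cols (cs.length : Int) cs) = [] := by
          rw [PySem.List.pyRange_one_eq_nil (by omega), List.flatMap_nil]
        rw [hmid]
        have hemit : pvEmit cols (cs.length : Int) cs (cols - 1) =
            "| ".toList ++ [cs[m']'hm'len] ++ " |\n".toList ++
              PySem.List.pyRepeat "+---".toList cols ++ "+".toList := by
          unfold pvEmit
          rw [if_neg (by omega), if_pos ⟨hmodlast, by omega⟩, hget]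
        simp only [List.flatMap_cons, List.flatMap_nil, hemit, pvBorder]
        rw [show (" |\n".toList : List Char) = " |".toList ++ ['\n'] from rfl,
          show ("\n| ".toList : List Char) = '\n' :: "| ".toList from rfl]
        simp only [List.append_assoc, List.cons_append, List.append_nil, List.nil_append]
        rw [hrowT]
      · -- more characters follow the first row
        have hlen2 : (cs.drop cols.toNat).length = cs.length - cols.toNat := by simp
        have hdl : (((cs.drop cols.toNat).length : Nat) : Int) = (cs.length : Int) - cols := by
          rw [hlen2]; omega
        have hdropne : cs.drop cols.toNat ≠ [] := by
          intro h
          rw [List.drop_eq_nil_iff] at h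
          omega
        have hshift : (PySem.List.pyRange cols (cs.length : Int)).flatMap (pvEmit cols (cs.length : Int) cs)
            = (PySem.List.pyRange 0 ((cs.drop cols.toNat).length : Int)).flatMap
                (pvEmit cols ((cs.drop cols.toNat).length : Int) (cs.drop cols.toNat)) := by
          rw [PySem.List.pyRange_one cols (cs.length : Int),
              PySem.List.pyRange_one 0 ((cs.drop cols.toNat).length : Int),
              List.flatMap_map, List.flatMap_map,
              show (((cs.drop cols.toNat).length : Int) - 0).toNat = ((cs.length : Int) - cols).toNat by omega]
          apply pvFlatMap_congr
          intro k hk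
          rw [List.mem_range] at hk
          have hkb : (k : Int) < (cs.length : Int) - cols := by omega
          have hgetEq : PySem.List.pyGetD cs (cols + (k : Int)) ' ' =
              PySem.List.pyGetD (cs.drop cols.toNat) (0 + (k : Int)) ' ' := by
            rw [PySem.List.pyGetD_eq_getElem cs ' ' (by omega) (by omega),
                PySem.List.pyGetD_eq_getElem (cs.drop cols.toNat) ' ' (by omega) (by omega),
                List.getElem_drop]
            congr 1
            omega
          unfold pvEmit
          rw [pvModShift cols (k : Int) hc, hgetEq,
              show PySem.Int.mod (0 + (k : Int)) cols = PySem.Int.mod (k : Int) cols by norm_num]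
          generalize PySem.Int.mod (k : Int) cols = M
          split_ifs <;> first | rfl | omega
        rw [hshift]
        have hihd := ih (cs.drop cols.toNat) (by omega) hdropne
        have hbody : (if (pvRowLoopD cols.toNat (pvBorder cols) cs).2 ≠ [] then
              (pvRowLoopD cols.toNat (pvBorder cols) cs).1 ++ '\n' :: pvCells (pvRowLoopD cols.toNat (pvBorder cols) cs).2
            else (pvRowLoopD cols.toNat (pvBorder cols) cs).1)
            = ("\n| ".toList ++ PySem.Chars.join " | ".toList ((cs.take cols.toNat).map (fun c => [c])) ++
               " |\n".toList ++ pvBorder cols) ++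
              (if (pvRowLoopD cols.toNat (pvBorder cols) (cs.drop cols.toNat)).2 ≠ [] then
                (pvRowLoopD cols.toNat (pvBorder cols) (cs.drop cols.toNat)).1 ++
                  '\n' :: pvCells (pvRowLoopD cols.toNat (pvBorder cols) (cs.drop cols.toNat)).2
              else (pvRowLoopD cols.toNat (pvBorder cols) (cs.drop cols.toNat)).1) := by
          rw [hloop]
          by_cases h2 : (pvRowLoopD cols.toNat (pvBorder cols) (cs.drop cols.toNat)).2 = []
          · simp [h2, List.append_assoc]
          · simp [h2, List.append_assoc]
        rw [hbody, ← hihd]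
        have hemit : pvEmit cols (cs.length : Int) cs (cols - 1) =
            "| ".toList ++ [cs[m']'hm'len] ++ " |\n".toList ++
              PySem.List.pyRepeat "+---".toList cols ++ "+\n".toList := by
          unfold pvEmit
          rw [if_pos ⟨hmodlast, by omega⟩, hget]
        simp only [List.flatMap_cons, List.flatMap_nil, hemit, pvBorder]
        rw [show (" |\n".toList : List Char) = " |".toList ++ ['\n'] from rfl,
          show ("\n| ".toList : List Char) = '\n' :: "| ".toList from rfl,
          show ("+\n".toList : List Char) = "+".toList ++ ['\n'] from rfl]
        simp only [List.append_assoc, List.cons_append, List.append_nil, List.nil_append]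
        rw [hrowT]

lemma pvPortsEq (rows columns : Int) (s : String) (hc : 1 ≤ columns) :
    patternNacho rows columns s = patternNacho_alt rows columns s := by
  rw [pvA_eq]
  simp only [patternNacho_alt]
  rw [show (PySem.List.pyRepeat "+---".toList columns ++ "+".toList : List Char) = pvBorder columns from rfl]
  generalize (s.toList ++ PySem.List.pyRepeat [' '] (rows * columns - (s.toList.length : Int))) = cs
  have hcn : 0 < columns.toNat := by omega
  have hm : ((columns.toNat : Nat) : Int) = columns := Int.toNat_of_nonneg (by omega)
  have hfull : PySem.Int.floordiv ((cs.length : Nat) : Int) columns = ((cs.length / columns.toNat : Nat) : Int) := by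
    rw [← hm]; exact PySem.Int.floordiv_natCast _ _
  have hrem : PySem.Int.mod ((cs.length : Nat) : Int) columns = ((cs.length % columns.toNat : Nat) : Int) := by
    rw [← hm]; exact PySem.Int.mod_natCast _ _
  obtain ⟨hb1, hb2⟩ := pvChunksBridge columns.toNat (pvBorder columns) hcn cs.length cs le_rfl
  -- the comprehension rows are the pvRowN rows
  have hrows : (List.range ((PySem.Int.floordiv ((cs.length : Nat) : Int) columns).toNat)).map (fun (k : Nat) =>
        "\n| ".toList ++ PySem.Chars.join " | ".toList
            ((PySem.List.slice cs (some ((k : Int) * columns)) (some (((k : Int) + 1) * columns))).map (fun c => [c])) ++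
          " |\n".toList ++ pvBorder columns)
      = (List.range (cs.length / columns.toNat)).map (fun k => pvRowN columns.toNat (pvBorder columns) cs (k * columns.toNat)) := by
    rw [hfull, Int.toNat_natCast]
    apply List.map_congr_left
    intro k _
    have e1 : (k : Int) * columns = (((k * columns.toNat : Nat) : Nat) : Int) := by
      rw [Nat.cast_mul, hm]
    have e2 : ((k : Int) + 1) * columns = (((k * columns.toNat : Nat) : Nat) : Int) + ((columns.toNat : Nat) : Int) := by
      rw [Nat.cast_mul, hm]; ring
    rw [e1, e2, PySem.List.slice_natCast_add]
    rfl
  have htail : PySem.List.slice cs (some (PySem.Int.floordiv ((cs.length : Nat) : Int) columns * columns)) none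
      = (pvRowLoopD columns.toNat (pvBorder columns) cs).2 := by
    have e : PySem.Int.floordiv ((cs.length : Nat) : Int) columns * columns
        = (((cs.length / columns.toNat * columns.toNat : Nat) : Nat) : Int) := by
      rw [hfull, Nat.cast_mul, hm]
    rw [e, PySem.List.slice_from_natCast, hb2]
  have hremIff : (PySem.Int.mod ((cs.length : Nat) : Int) columns ≠ 0)
      ↔ (pvRowLoopD columns.toNat (pvBorder columns) cs).2 ≠ [] := by
    rw [hrem, ← hb2, ne_eq, ne_eq, List.drop_eq_nil_iff, Int.natCast_eq_zero]
    have h1 : cs.length / columns.toNat * columns.toNat + cs.length % columns.toNat = cs.length :=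
      Nat.div_add_mod' cs.length columns.toNat
    omega
  rw [hrows]
  by_cases h2 : (pvRowLoopD columns.toNat (pvBorder columns) cs).2 ≠ []
  · have hnil : cs ≠ [] := by
      intro hx
      apply h2
      rw [hx, pvRowLoopD, dif_neg (by simp)]
    have hmain := pvMain columns (by omega) cs.length cs le_rfl hnil
    rw [if_pos h2] at hmain
    rw [if_pos (hremIff.mpr h2), htail]
    simp only [List.flatten_append, List.flatten_cons, List.flatten_nil, List.append_nil, hb1]
    have hX : (pvRowLoopD columns.toNat (pvBorder columns) cs).1 ++
        ("\n".toList ++ pvCells (pvRowLoopD columns.toNat (pvBorder columns) cs).2) =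
        '\n' :: (PySem.List.pyRange 0 ((cs.length : Nat) : Int)).flatMap (pvEmit columns ((cs.length : Nat) : Int) cs) := by
      simpa using hmain.symm
    rw [hX, if_pos (List.cons_ne_nil _ _)]
  · rw [if_neg (fun hx => h2 (hremIff.mp hx))]
    by_cases hnil : cs = []
    · subst hnil
      simp [PySem.List.pyRange_one_eq_nil]
    · have hmain := pvMain columns (by omega) cs.length cs le_rfl hnil
      rw [if_neg h2] at hmain
      rw [hb1, ← hmain, if_pos (List.cons_ne_nil _ _)]

-- ===== VERDICT (by name: the statement is the Claim_ definition above) =====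
theorem patternNacho_spec : Claim_equal_patternNacho := by
  intro rows columns s _ hpre
  show patternNacho rows columns s = patternNacho_alt rows columns s
  exact pvPortsEq rows columns s hpre
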